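-- pv_equiv track=rewrite | github.com/saway126/lol-balancer-bot | mmr.py | distribute_team_delta_equal
-- ===== SOURCE A (Python) =====
-- from typing import List
--
-- def distribute_team_delta_equal(member_mmrs: List[int], team_delta: int) -> List[int]:
--     """Distribute a team-level MMR delta equally to members.
--
--     This is a simple scheme: each member gets round(team_delta / n).
--     The remainder is added to the highest-MMR members to keep totals consistent.
--     """
--     n = len(member_mmrs)
--     if n == 0:
--         return []
--     base = team_delta // n
--     remainder = team_delta - base * n
--     # sort indices by mmr descending to give remainder to higher mmr players
--     indexed = sorted(enumerate(member_mmrs), key=lambda x: x[1], reverse=True)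
--     deltas = [base] * n
--     for i in range(remainder):
--         idx = indexed[i][0]
--         deltas[idx] += 1
--     return [member_mmrs[i] + deltas[i] for i in range(n)]
-- ===== SOURCE B (Python) =====
-- from typing import List
--
-- def distribute_team_delta_equal(member_mmrs: List[int], team_delta: int) -> List[int]:
--     """Same distribution without sorting: each member's rank is counted directly
--     (strictly higher MMRs, plus equal MMRs at an earlier index); members whose
--     rank is below the remainder get one extra point."""
--     n = len(member_mmrs)
--     if n == 0:
--         return []
--     base = team_delta // n
--     remainder = team_delta - base * n
--     out = []
--     for i, v in enumerate(member_mmrs):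
--         rank = 0
--         for j, w in enumerate(member_mmrs):
--             if w > v or (w == v and j < i):
--                 rank += 1
--         out.append(v + base + (1 if rank < remainder else 0))
--     return out
-- ===== Notes on version B (the rewrite author's own statement) =====
-- stated objective: alternative
-- what changed: Replaces the stable reverse sort plus in-place delta array with a direct per-member rank count (strictly higher MMRs, plus equal MMRs at earlier indices); a member gets the extra point iff its rank is below the remainder.
import Mathlib
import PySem

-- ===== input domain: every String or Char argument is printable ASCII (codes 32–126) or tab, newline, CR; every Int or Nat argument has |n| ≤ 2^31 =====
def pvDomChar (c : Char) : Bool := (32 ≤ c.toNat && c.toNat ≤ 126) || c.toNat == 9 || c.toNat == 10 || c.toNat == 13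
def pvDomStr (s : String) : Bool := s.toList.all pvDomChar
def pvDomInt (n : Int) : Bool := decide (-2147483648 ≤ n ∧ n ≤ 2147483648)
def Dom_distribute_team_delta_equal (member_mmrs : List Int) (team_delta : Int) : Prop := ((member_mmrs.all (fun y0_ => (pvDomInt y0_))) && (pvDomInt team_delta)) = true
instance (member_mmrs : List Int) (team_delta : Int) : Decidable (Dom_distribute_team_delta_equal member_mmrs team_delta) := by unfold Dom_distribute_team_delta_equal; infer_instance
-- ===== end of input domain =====

-- B replaces A's stable reverse sort + in-place delta array by a direct per-member
-- rank count; an alternative decomposition of the same task, not claimed faster.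

-- ===== PORT A =====
-- Indexing with pyGetD/pySetD is exact here: every index used (a loop index
-- < remainder < n into the sorted list, and an enumerate index 0..n-1 into deltas)
-- is in range of the list it indexes, so Python never raises.
def distribute_team_delta_equal (member_mmrs : List Int) (team_delta : Int) : List Int :=
  let n : Int := PySem.List.len member_mmrs
  if n = 0 then []
  else
    let base := PySem.Int.floordiv team_delta n
    let remainder := team_delta - base * n
    let indexed := PySem.List.sorted (PySem.List.enumerate member_mmrs 0) (fun x => x.2) true
    let deltas := PySem.List.pyRepeat [base] n
    let deltas := (PySem.List.pyRange 0 remainder 1).foldl (fun ds i =>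
        let idx := (PySem.List.pyGetD indexed i (0, 0)).1
        PySem.List.pySetD ds idx (PySem.List.pyGetD ds idx 0 + 1)) deltas
    (PySem.List.pyRange 0 n 1).map (fun i =>
        PySem.List.pyGetD member_mmrs i 0 + PySem.List.pyGetD deltas i 0)

-- ===== PORT B =====
def distribute_team_delta_equal_alt (member_mmrs : List Int) (team_delta : Int) : List Int :=
  let n : Int := PySem.List.len member_mmrs
  if n = 0 then []
  else
    let base := PySem.Int.floordiv team_delta n
    let remainder := team_delta - base * n
    (PySem.List.enumerate member_mmrs 0).foldl (fun out p =>
      let rank : Int := (PySem.List.enumerate member_mmrs 0).foldl (fun r q =>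
          if p.2 < q.2 ∨ (q.2 = p.2 ∧ q.1 < p.1) then r + 1 else r) 0
      out ++ [p.2 + base + (if rank < remainder then 1 else 0)]) []


-- ===== PRECONDITION & SPEC =====
def Spec_distribute_team_delta_equal (member_mmrs : List Int) (team_delta : Int) (out : List Int) : Prop := out = distribute_team_delta_equal_alt member_mmrs team_delta
instance (member_mmrs : List Int) (team_delta : Int) (out : List Int) : Decidable (Spec_distribute_team_delta_equal member_mmrs team_delta out) := by unfold Spec_distribute_team_delta_equal; infer_instance

-- ===== CLAIM (what is proved, stated in full; the proofs are below) =====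
def Claim_equal_distribute_team_delta_equal : Prop := ∀ (member_mmrs : List Int) (team_delta : Int), Dom_distribute_team_delta_equal member_mmrs team_delta → Spec_distribute_team_delta_equal member_mmrs team_delta (distribute_team_delta_equal member_mmrs team_delta)

-- ===== LEMMAS AND PROOFS =====

-- The strict order "a comes before b" in Python's stable reverse sort of (index, mmr)
-- pairs with distinct indices: higher mmr first, ties broken by lower index.
abbrev pvBefore (a b : Int × Int) : Prop := b.2 < a.2 ∨ (a.2 = b.2 ∧ a.1 < b.1)

theorem pvBefore_asymm (a b : Int × Int) (h : pvBefore a b) : ¬ pvBefore b a := by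
  unfold pvBefore at *; rcases h with h | ⟨h1, h2⟩ <;> rintro (h' | ⟨h1', h2'⟩) <;> omega

-- stability: inserting an element whose index exceeds all accumulated ones keeps the list pvBefore-ordered
theorem pairwise_insertBy_pvBefore (x : Int × Int) (acc : List (Int × Int))
    (h1 : acc.Pairwise pvBefore) (h2 : ∀ a ∈ acc, a.1 < x.1) :
    (PySem.List.insertBy (fun a b => decide (b.2 < a.2)) x acc).Pairwise pvBefore := by
  induction acc with
  | nil => simp [PySem.List.insertBy]
  | cons y ys ih =>
    rcases List.pairwise_cons.mp h1 with ⟨hy, hys⟩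
    simp only [PySem.List.insertBy]
    by_cases hxy : y.2 < x.2
    · rw [if_pos (by simpa using hxy)]
      refine List.Pairwise.cons ?_ h1
      intro b hb
      rcases List.mem_cons.mp hb with hb | hb
      · subst hb; exact Or.inl hxy
      · have := hy b hb
        unfold pvBefore at *; omega
    · rw [if_neg (by simpa using hxy)]
      refine List.Pairwise.cons ?_ (ih hys (fun a ha => h2 a (List.mem_cons_of_mem _ ha)))
      intro b hb
      rcases (PySem.List.mem_insertBy _ _ _ _).mp hb with hb | hb
      · have hyx : y.1 < x.1 := h2 y List.mem_cons_self
        rw [hb]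
        unfold pvBefore; omega
      · exact hy b hb
theorem pairwise_foldl_insertBy (l : List (Int × Int)) :
    ∀ acc : List (Int × Int), acc.Pairwise pvBefore →
    (∀ a ∈ acc, ∀ b ∈ l, a.1 < b.1) → l.Pairwise (fun a b => a.1 < b.1) →
    (l.foldl (fun acc x => PySem.List.insertBy (fun a b => decide (b.2 < a.2)) x acc) acc).Pairwise pvBefore := by
  induction l with
  | nil => intro acc h1 _ _; simpa using h1
  | cons x l ih =>
    intro acc h1 h2 h3
    rcases List.pairwise_cons.mp h3 with ⟨hx, hl⟩
    refine ih _ (pairwise_insertBy_pvBefore x acc h1 (fun a ha => h2 a ha x List.mem_cons_self)) ?_ hl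
    intro a ha b hb
    rcases (PySem.List.mem_insertBy _ _ _ _).mp ha with ha | ha
    · subst ha; exact hx b hb
    · exact h2 a ha b (List.mem_cons_of_mem _ hb)
theorem sorted_pairwise_pvBefore (xs : List Int) :
    (PySem.List.sorted (PySem.List.enumerate xs 0) (fun x => x.2) true).Pairwise pvBefore := by
  rw [PySem.List.sorted_rev_eq_foldl_insertBy]
  exact pairwise_foldl_insertBy _ [] (by simp) (by simp) (PySem.List.pairwise_lt_enumerate xs 0)

-- in a pvBefore-ordered list the number of elements strictly before l[p] is p
theorem countP_pairwise_eq_pos (l : List (Int × Int)) (hp : l.Pairwise pvBefore) :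
    ∀ (p : Nat) (hlt : p < l.length),
    l.countP (fun a => decide (pvBefore a l[p])) = p := by
  induction l with
  | nil => intro p hlt; simp at hlt
  | cons x t ih =>
    intro p hlt
    rcases List.pairwise_cons.mp hp with ⟨hx, ht⟩
    cases p with
    | zero =>
      show List.countP (fun a => decide (pvBefore a x)) (x :: t) = 0
      have hxx : ¬ pvBefore x x := by unfold pvBefore; omega
      have h0 : t.countP (fun a => decide (pvBefore a x)) = 0 := by
        apply List.countP_eq_zero.mpr
        intro a ha
        simpa using pvBefore_asymm x a (hx a ha)
      rw [List.countP_cons, h0]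
      simp [hxx]
    | succ q =>
      have hq : q < t.length := by simpa using hlt
      show List.countP (fun a => decide (pvBefore a (t[q]'hq))) (x :: t) = q + 1
      have h1 := ih ht q hq
      have hxq : pvBefore x (t[q]'hq) := hx _ (List.getElem_mem hq)
      rw [List.countP_cons, h1, if_pos (decide_eq_true hxq)]

-- the 'deltas[idx] += 1' loop counts how often each index occurs
theorem pySetD_count_fold (L : List Int) :
    ∀ (ds : List Int) (j : Int), 0 ≤ j → j < ds.length →
    (∀ q ∈ L, 0 ≤ q ∧ q < ds.length) →
    PySem.List.pyGetD
      (L.foldl (fun ds q => PySem.List.pySetD ds q (PySem.List.pyGetD ds q 0 + 1)) ds) j 0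
      = PySem.List.pyGetD ds j 0 + L.count j := by
  induction L with
  | nil => intro ds j _ _ _; simp
  | cons q L ih =>
    intro ds j hj0 hjlen hq
    rcases hq q List.mem_cons_self with ⟨hq0, hqlen⟩
    have hlen : (PySem.List.pySetD ds q (PySem.List.pyGetD ds q 0 + 1)).length = ds.length :=
      PySem.List.length_pySetD ds q _
    simp only [List.foldl_cons, List.count_cons]
    rw [ih _ j hj0 (by omega) (fun a ha => by
      have := hq a (List.mem_cons_of_mem _ ha); omega)]
    rw [PySem.List.pySetD_of_nonneg ds _ hq0, PySem.List.pyGetD_of_nonneg _ _ hj0,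
        PySem.List.pyGetD_of_nonneg _ _ hj0, PySem.List.pyGetD_of_nonneg _ _ hq0]
    by_cases hjq : q = j
    · subst hjq
      have hlt : q.toNat < ds.length := by omega
      simp only [List.getD, List.getElem?_set_self', beq_self_eq_true, if_true,
        List.getElem?_eq_getElem hlt]
      simp [Function.const]
      ring
    · have hne : q.toNat ≠ j.toNat := by omega
      simp only [List.getD, List.getElem?_set_ne hne, beq_iff_eq, if_neg hjq]
      push_cast
      ring


theorem count_take_nodup (l : List Int) (hnd : l.Nodup) (p k : Nat) (hp : p < l.length) :
    (l.take k).count l[p] = if p < k then 1 else 0 := by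
  by_cases h : p < k
  · have hplen : p < (l.take k).length := by simp [List.length_take]; omega
    have hmem : l[p] ∈ l.take k := by
      have hg : (l.take k)[p] = l[p] := List.getElem_take
      exact hg ▸ List.getElem_mem hplen
    rw [if_pos h]
    exact List.count_eq_one_of_mem (hnd.sublist (List.take_sublist _ _)) hmem
  · rw [if_neg h, List.count_eq_zero]
    intro hmem
    obtain ⟨q, hq, hql⟩ := List.getElem_of_mem hmem
    have hqk : q < k := lt_of_lt_of_le hq (by simp [List.length_take])
    have hq' : q < l.length := lt_of_lt_of_le hq (by simp [List.length_take])
    have hgl : l[q] = l[p] := by rw [← List.getElem_take (j := k)]; exact hql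
    have := (hnd.getElem_inj_iff).mp hgl
    omega


theorem pv_main_eq (xs : List Int) (td : Int) :
    distribute_team_delta_equal xs td = distribute_team_delta_equal_alt xs td := by
  by_cases hxs : xs = []
  · subst hxs; simp [distribute_team_delta_equal, distribute_team_delta_equal_alt]
  · have hpos : 0 < xs.length := List.length_pos_iff.mpr hxs
    have hn : (PySem.List.len xs) ≠ 0 := by simp [PySem.List.len_eq]; omega
    unfold distribute_team_delta_equal distribute_team_delta_equal_alt
    simp only [if_neg hn]
    -- abbreviations
    set N : Int := PySem.List.len xs with hN
    set base : Int := PySem.Int.floordiv td N with hbase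
    set r : Int := td - base * N with hr
    set e : List (Int × Int) := PySem.List.enumerate xs 0 with he
    set s : List (Int × Int) := PySem.List.sorted e (fun x => x.2) true with hs
    have hNlen : N = (xs.length : Int) := by rw [hN, PySem.List.len_eq]
    have hNpos : 0 < N := by rw [hNlen]; exact_mod_cast hpos
    have hrmod : r = PySem.Int.mod td N := by
      rw [hr, hbase]
      have := PySem.Int.floordiv_mul_add_mod td N
      omega
    have hr0 : 0 <= r := by rw [hrmod]; exact PySem.Int.mod_nonneg td hNpos
    have hrN : r < N := by rw [hrmod]; exact PySem.Int.mod_lt td hNpos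
    have hslen : s.length = xs.length := by
      rw [hs, PySem.List.length_sorted, he, PySem.List.length_enumerate]
    have hperm : s.Perm e := PySem.List.sorted_perm e _ true
    have hpair : s.Pairwise pvBefore := by rw [hs, he]; exact sorted_pairwise_pvBefore xs
    have hfstnd : (s.map (fun x => x.1)).Nodup := by
      have h1 : (e.map (fun x => x.1)) = PySem.List.pyRange 0 (0 + xs.length) 1 := by
        rw [he]; exact PySem.List.map_fst_enumerate xs 0
      apply (hperm.map (fun x : Int × Int => x.1)).nodup_iff.mpr
      rw [h1]; exact PySem.List.nodup_pyRange_one _ _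
    have hfstmem : ∀ q ∈ s.map (fun x => x.1), 0 <= q ∧ q < N := by
      intro q hq
      have h2 : q ∈ e.map (fun x => x.1) := (hperm.map _).mem_iff.mp hq
      rw [he, PySem.List.map_fst_enumerate] at h2
      have h3 := (PySem.List.mem_pyRange_one).mp h2
      rw [hNlen]; omega
    -- rewrite the A-side fold into a fold over the first r sorted indices
    have htake : (PySem.List.pyRange 0 r 1).map (fun i => PySem.List.pyGetD s i ((0:Int),(0:Int)))
        = s.take r.toNat := by
      apply List.ext_getElem
      · simp [PySem.List.length_pyRange_one, List.length_take, hslen]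
        omega
      · intro k h1 h2
        have hk : k < r.toNat := by
          simpa [PySem.List.length_pyRange_one] using h1
        have hks : k < s.length := by rw [hslen]; omega
        rw [List.getElem_map, PySem.List.getElem_pyRange_one, List.getElem_take, zero_add,
          PySem.List.pyGetD_natCast]
        simp [List.getD, List.getElem?_eq_getElem hks]
    have hfold : (PySem.List.pyRange 0 r 1).foldl (fun ds i =>
          let idx := (PySem.List.pyGetD s i ((0:Int),(0:Int))).1
          PySem.List.pySetD ds idx (PySem.List.pyGetD ds idx 0 + 1))
          (PySem.List.pyRepeat [base] N)
        = ((s.take r.toNat).map (fun x => x.1)).foldl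
            (fun ds q => PySem.List.pySetD ds q (PySem.List.pyGetD ds q 0 + 1))
            (PySem.List.pyRepeat [base] N) := by
      rw [← htake, List.foldl_map, List.foldl_map]
    simp only [hfold]
    -- B side: inner fold is a countP, the append-fold is a map
    simp only [PySem.List.foldl_ite_add_one, PySem.List.foldl_append_singleton_eq_map,
      List.nil_append, zero_add]
    -- elementwise
    apply List.ext_getElem
    · simp [he, PySem.List.length_pyRange_one, PySem.List.length_enumerate, hNlen]
    · intro k h1 h2
      have hkx : k < xs.length := by
        simpa [he, PySem.List.length_enumerate] using h2
      have hks : k < s.length := by omega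
      rw [List.getElem_map, List.getElem_map, PySem.List.getElem_pyRange_one]
      have hek : e[k]'(by rw [he, PySem.List.length_enumerate]; exact hkx)
          = ((k : Int), xs[k]'hkx) := by
        simp [he, PySem.List.getElem_enumerate]
      rw [hek, zero_add]
      dsimp only
      have hxk : PySem.List.pyGetD xs (k : Int) 0 = xs[k]'hkx := by
        rw [PySem.List.pyGetD_natCast]
        simp [List.getD, List.getElem?_eq_getElem hkx]
      have hlenrep : (PySem.List.pyRepeat [base] N).length = N.toNat := by
        rw [PySem.List.pyRepeat_singleton]; simp
      have hdel : PySem.List.pyGetD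
          (((s.take r.toNat).map (fun x => x.1)).foldl
            (fun ds q => PySem.List.pySetD ds q (PySem.List.pyGetD ds q 0 + 1))
            (PySem.List.pyRepeat [base] N)) (k : Int) 0
          = PySem.List.pyGetD (PySem.List.pyRepeat [base] N) (k : Int) 0
            + ((s.take r.toNat).map (fun x => x.1)).count (k : Int) := by
        apply pySetD_count_fold
        · positivity
        · rw [hlenrep]; omega
        · intro q hq
          have hsub : q ∈ s.map (fun x => x.1) := by
            have hsl := (List.take_sublist r.toNat s).map (fun x => x.1)
            exact hsl.subset hq
          have := hfstmem q hsub
          rw [hlenrep]; omega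
      have hrep : PySem.List.pyGetD (PySem.List.pyRepeat [base] N) (k : Int) 0 = base := by
        rw [PySem.List.pyRepeat_singleton, PySem.List.pyGetD_natCast]
        have hkN : k < N.toNat := by omega
        simp [List.getD, hkN]
      have hy : ((k : Int), xs[k]'hkx) ∈ s := by
        apply hperm.mem_iff.mpr
        rw [← hek]
        exact List.getElem_mem _
      obtain ⟨p, hp, hsp⟩ := List.getElem_of_mem hy
      have hcnt : List.countP (fun a => decide (pvBefore a ((k : Int), xs[k]'hkx))) s = p := by
        rw [← hsp]; exact countP_pairwise_eq_pos s hpair p hp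
      have hcnte : List.countP
          (fun x => decide ((xs[k]'hkx) < x.2 ∨ x.2 = xs[k]'hkx ∧ x.1 < (k : Int))) e = p := by
        calc List.countP (fun x => decide ((xs[k]'hkx) < x.2 ∨ x.2 = xs[k]'hkx ∧ x.1 < (k : Int))) e
            = List.countP (fun x => decide ((xs[k]'hkx) < x.2 ∨ x.2 = xs[k]'hkx ∧ x.1 < (k : Int))) s :=
              (List.Perm.countP_eq _ hperm).symm
          _ = List.countP (fun a => decide (pvBefore a ((k : Int), xs[k]'hkx))) s := by
              apply List.countP_congr
              intro a _
              simp [pvBefore]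
          _ = p := hcnt
      have hpos' : p < (s.map (fun x => x.1)).length := by simpa using hp
      have hfstp : (s.map (fun x => x.1))[p]'hpos' = (k : Int) := by
        rw [List.getElem_map, hsp]
      have hcount : ((s.take r.toNat).map (fun x => x.1)).count (k : Int)
          = if p < r.toNat then 1 else 0 := by
        rw [List.map_take, ← hfstp]
        exact count_take_nodup _ hfstnd p r.toNat hpos'
      rw [hdel, hrep, hxk, hcount, hcnte]
      push_cast
      split_ifs <;> omega


-- ===== VERDICT (by name: the statement is the Claim_ definition above) =====
theorem distribute_team_delta_equal_spec : Claim_equal_distribute_team_delta_equal := by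
  intro member_mmrs team_delta _
  unfold Spec_distribute_team_delta_equal
  exact pv_main_eq member_mmrs team_delta
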